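-- pv_equiv track=rewrite | github.com/Prasanna163/KNF | knf_core/kuid_index.py | build_prefix_index
-- ===== SOURCE A (Python) =====
-- from collections import defaultdict
--
-- _HEX = set("0123456789ABCDEF")
--
-- def normalize_kuid_raw(value) -> str:
--     if value is None:
--         return ""
--     raw = "".join(ch for ch in str(value).upper() if ch in _HEX)
--     # KUID is byte-addressable; keep full bytes only.
--     if len(raw) % 2 != 0:
--         raw = raw[:-1]
--     return raw
--
-- def build_prefix_index(rows: list[dict], code_field: str = "KUID") -> dict:
--     buckets = {
--         "prefix2": defaultdict(list),
--         "prefix4": defaultdict(list),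
--         "prefix6": defaultdict(list),
--     }
--     for row in rows:
--         code = row.get(code_field) or row.get("KUID_raw")
--         raw = normalize_kuid_raw(code)
--         if not raw:
--             continue
--         file_name = (
--             row.get("File")
--             or row.get("file")
--             or row.get("input_file_name")
--             or row.get("input_file")
--             or ""
--         )
--         source_batch = row.get("source_batch", "")
--         ref = {"file": file_name}
--         if source_batch:
--             ref["source_batch"] = source_batch
--
--         if len(raw) >= 2:
--             buckets["prefix2"][raw[:2]].append(ref)
--         if len(raw) >= 4:
--             buckets["prefix4"][raw[:4]].append(ref)
--         if len(raw) >= 6: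
--             buckets["prefix6"][raw[:6]].append(ref)
--
--     out = {}
--     for key, mapping in buckets.items():
--         out[key] = {prefix: mapping[prefix] for prefix in sorted(mapping)}
--     return out
-- ===== SOURCE B (Python) =====
-- _HEX = set("0123456789ABCDEF")
--
-- def normalize_kuid_raw(value) -> str:
--     if value is None:
--         return ""
--     raw = "".join(ch for ch in str(value).upper() if ch in _HEX)
--     if len(raw) % 2 != 0:
--         raw = raw[:-1]
--     return raw
--
-- def build_prefix_index(rows: list[dict], code_field: str = "KUID") -> dict:
--     # Pass 1: flatten rows into (raw, ref) records once.
--     records = []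
--     for row in rows:
--         code = row.get(code_field) or row.get("KUID_raw")
--         raw = normalize_kuid_raw(code)
--         if not raw:
--             continue
--         file_name = (
--             row.get("File")
--             or row.get("file")
--             or row.get("input_file_name")
--             or row.get("input_file")
--             or ""
--         )
--         source_batch = row.get("source_batch", "")
--         ref = {"file": file_name}
--         if source_batch:
--             ref["source_batch"] = source_batch
--         records.append((raw, ref))
--     # Pass 2: one bucket per prefix length, built by sorted-prefix grouping
--     # with list comprehensions (no mutable accumulator dicts).
--     out = {}
--     for key, length in (("prefix2", 2), ("prefix4", 4), ("prefix6", 6)):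
--         keep = [(raw, ref) for raw, ref in records if len(raw) >= length]
--         prefixes = sorted({raw[:length] for raw, _ in keep})
--         out[key] = {p: [ref for raw, ref in keep if raw[:length] == p] for p in prefixes}
--     return out
-- ===== Notes on version B (the rewrite author's own statement) =====
-- stated objective: alternative
-- what changed: A interleaves one pass over rows that mutates three defaultdicts and then re-sorts each; B first flattens rows into a (raw, ref) record list, then builds each bucket without any mutable dict: per prefix length it computes the sorted set of prefixes and materialises each group by a comprehension over the records.
import Mathlib
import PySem

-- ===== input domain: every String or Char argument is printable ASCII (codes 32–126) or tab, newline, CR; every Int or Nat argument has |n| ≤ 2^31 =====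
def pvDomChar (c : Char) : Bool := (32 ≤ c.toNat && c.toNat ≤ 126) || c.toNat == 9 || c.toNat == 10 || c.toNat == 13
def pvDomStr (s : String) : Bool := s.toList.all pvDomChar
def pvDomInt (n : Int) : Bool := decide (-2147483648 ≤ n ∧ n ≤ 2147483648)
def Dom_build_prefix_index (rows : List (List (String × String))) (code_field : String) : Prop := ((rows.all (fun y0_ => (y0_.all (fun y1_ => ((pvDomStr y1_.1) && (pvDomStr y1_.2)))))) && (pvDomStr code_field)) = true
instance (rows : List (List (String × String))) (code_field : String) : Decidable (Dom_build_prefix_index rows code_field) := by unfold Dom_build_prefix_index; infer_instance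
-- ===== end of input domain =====

-- B replaces A's single pass mutating three defaultdicts by a records pass plus, per prefix
-- length, sorted-set-of-prefixes grouping via comprehensions (alternative decomposition, same results).


-- ===== PORT A =====
-- module-level helpers shared by both Python files
def pvHex (c : Char) : Bool := ("0123456789ABCDEF".toList).contains c   -- ch in _HEX

def normalize_kuid_raw (value : Option String) : List Char :=
  match value with
  | none => []
  | some s =>
    let raw := (PySem.Chars.upper s.toList).filter pvHex
    if raw.length % 2 ≠ 0 then PySem.List.slice raw none (some (-1)) else raw

-- Python's 'x or y' on strings / optional strings (left operand kept when truthy)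
def pyOrStr (o : Option String) (e : String) : String :=
  match o with
  | some s => if s = "" then e else s
  | none => e

def pyOrOpt (o : Option String) (e : Option String) : Option String :=
  match o with
  | some s => if s = "" then e else some s
  | none => e

-- the body of A's 'for row in rows' loop (state = the three defaultdict buckets)
def pvStepA (code_field : String)
    (b : PySem.Dict String (List (List (String × String))) ×
         PySem.Dict String (List (List (String × String))) ×
         PySem.Dict String (List (List (String × String))))
    (row : List (String × String)) :
    PySem.Dict String (List (List (String × String))) ×
    PySem.Dict String (List (List (String × String))) ×
    PySem.Dict String (List (List (String × String))) :=
  let code := pyOrOpt ((PySem.Dict.mk row).get? code_field) ((PySem.Dict.mk row).get? "KUID_raw")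
  let raw := normalize_kuid_raw code
  if raw = [] then b
  else
    let file_name := pyOrStr ((PySem.Dict.mk row).get? "File")
      (pyOrStr ((PySem.Dict.mk row).get? "file")
        (pyOrStr ((PySem.Dict.mk row).get? "input_file_name")
          (pyOrStr ((PySem.Dict.mk row).get? "input_file") "")))
    let source_batch := (PySem.Dict.mk row).getD "source_batch" ""
    let ref : List (String × String) :=
      if source_batch = "" then [("file", file_name)]
      else [("file", file_name), ("source_batch", source_batch)]
    (if 2 ≤ raw.length then b.1.modify (String.ofList (PySem.List.slice raw none (some 2))) [] (· ++ [ref]) else b.1,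
     if 4 ≤ raw.length then b.2.1.modify (String.ofList (PySem.List.slice raw none (some 4))) [] (· ++ [ref]) else b.2.1,
     if 6 ≤ raw.length then b.2.2.modify (String.ofList (PySem.List.slice raw none (some 6))) [] (· ++ [ref]) else b.2.2)

-- port of A: one pass over rows mutating three (defaultdict) buckets, then sort each
def build_prefix_index (rows : List (List (String × String))) (code_field : String) : List (String × List (String × List (List (String × String)))) :=
  let bs := rows.foldl (pvStepA code_field) (PySem.Dict.empty, PySem.Dict.empty, PySem.Dict.empty)
  [("prefix2", (PySem.List.sorted bs.1.keys (fun k => k) false).map (fun p => (p, bs.1.getD p []))),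
   ("prefix4", (PySem.List.sorted bs.2.1.keys (fun k => k) false).map (fun p => (p, bs.2.1.getD p []))),
   ("prefix6", (PySem.List.sorted bs.2.2.keys (fun k => k) false).map (fun p => (p, bs.2.2.getD p [])))]

-- ===== PORT B =====
-- the body of B's pass-1 loop: append one (raw, ref) record per non-empty row
def pvStepB (code_field : String)
    (acc : List (List Char × List (String × String)))
    (row : List (String × String)) : List (List Char × List (String × String)) :=
  let code := pyOrOpt ((PySem.Dict.mk row).get? code_field) ((PySem.Dict.mk row).get? "KUID_raw")
  let raw := normalize_kuid_raw code
  if raw = [] then acc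
  else
    let file_name := pyOrStr ((PySem.Dict.mk row).get? "File")
      (pyOrStr ((PySem.Dict.mk row).get? "file")
        (pyOrStr ((PySem.Dict.mk row).get? "input_file_name")
          (pyOrStr ((PySem.Dict.mk row).get? "input_file") "")))
    let source_batch := (PySem.Dict.mk row).getD "source_batch" ""
    let ref : List (String × String) :=
      if source_batch = "" then [("file", file_name)]
      else [("file", file_name), ("source_batch", source_batch)]
    acc ++ [(raw, ref)]

-- port of B: flatten rows into (raw, ref) records, then per length group by sorted prefixes
def build_prefix_index_alt (rows : List (List (String × String))) (code_field : String) : List (String × List (String × List (List (String × String)))) :=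
  let records := rows.foldl (pvStepB code_field) []
  let bucket := fun (len : Nat) =>
    let keep := records.filter (fun r => decide (len ≤ r.1.length))
    let prefixes := PySem.List.sorted
      (PySem.List.dedup (keep.map (fun r => String.ofList (PySem.List.slice r.1 none (some (len : Int))))))
      (fun p => p) false
    prefixes.map (fun p =>
      (p, (keep.filter (fun r => String.ofList (PySem.List.slice r.1 none (some (len : Int))) == p)).map (fun r => r.2)))
  [("prefix2", bucket 2), ("prefix4", bucket 4), ("prefix6", bucket 6)]

-- ===== PRECONDITION & SPEC =====
def Spec_build_prefix_index (rows : List (List (String × String))) (code_field : String) (out : List (String × List (String × List (List (String × String))))) : Prop := out = build_prefix_index_alt rows code_field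
instance (rows : List (List (String × String))) (code_field : String) (out : List (String × List (String × List (List (String × String))))) : Decidable (Spec_build_prefix_index rows code_field out) := by
  unfold Spec_build_prefix_index
  exact @instDecidableEqList _ (fun _ _ => by infer_instance) out _

-- ===== CLAIM (what is proved, stated in full; the proofs are below) =====
def Claim_equal_build_prefix_index : Prop := ∀ (rows : List (List (String × String))) (code_field : String), Dom_build_prefix_index rows code_field → Spec_build_prefix_index rows code_field (build_prefix_index rows code_field)

-- ===== LEMMAS AND PROOFS =====

-- the (raw, ref) data of one row, and the length-L bucket both programs compute
def pvRaw (code_field : String) (row : List (String × String)) : List Char :=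
  normalize_kuid_raw (pyOrOpt ((PySem.Dict.mk row).get? code_field) ((PySem.Dict.mk row).get? "KUID_raw"))

def pvRef (row : List (String × String)) : List (String × String) :=
  let file_name := pyOrStr ((PySem.Dict.mk row).get? "File")
    (pyOrStr ((PySem.Dict.mk row).get? "file")
      (pyOrStr ((PySem.Dict.mk row).get? "input_file_name")
        (pyOrStr ((PySem.Dict.mk row).get? "input_file") "")))
  let source_batch := (PySem.Dict.mk row).getD "source_batch" ""
  if source_batch = "" then [("file", file_name)]
  else [("file", file_name), ("source_batch", source_batch)]

def pvPref (L : Nat) (code_field : String) (row : List (String × String)) : String :=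
  String.ofList ((pvRaw code_field row).take L)

def pvBase (L : Nat) (code_field : String) (rows : List (List (String × String))) : List (List (String × String)) :=
  rows.filter (fun row => decide (L ≤ (pvRaw code_field row).length))

def pvBucket (L : Nat) (code_field : String) (rows : List (List (String × String))) : List (String × List (List (String × String))) :=
  (PySem.List.sorted (PySem.Set.ofList ((pvBase L code_field rows).map (pvPref L code_field))) (fun k => k) false).map
    (fun p => (p, ((pvBase L code_field rows).filter (fun row => pvPref L code_field row == p)).map pvRef))

-- the per-bucket update A performs for one prefix length
def pvStep (L : Nat) (code_field : String)
    (d : PySem.Dict String (List (List (String × String)))) (row : List (String × String)) :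
    PySem.Dict String (List (List (String × String))) :=
  if L ≤ (pvRaw code_field row).length then d.modify (pvPref L code_field row) [] (· ++ [pvRef row]) else d

lemma pvSlice_take (xs : List Char) (k : Nat) :
    PySem.List.slice xs none (some (k : Int)) = xs.take k := PySem.List.slice_to_natCast xs k

lemma pvSlice2 (xs : List Char) : PySem.List.slice xs none (some 2) = xs.take 2 := pvSlice_take xs 2
lemma pvSlice4 (xs : List Char) : PySem.List.slice xs none (some 4) = xs.take 4 := pvSlice_take xs 4
lemma pvSlice6 (xs : List Char) : PySem.List.slice xs none (some 6) = xs.take 6 := pvSlice_take xs 6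

lemma stepA_eq (code_field : String) (b) (row : List (String × String)) :
    pvStepA code_field b row =
      (pvStep 2 code_field b.1 row, pvStep 4 code_field b.2.1 row, pvStep 6 code_field b.2.2 row) := by
  unfold pvStepA pvStep pvPref pvRef pvRaw
  by_cases h : normalize_kuid_raw (pyOrOpt ((PySem.Dict.mk row).get? code_field) ((PySem.Dict.mk row).get? "KUID_raw")) = []
  · simp [h]
  · simp only [h, ite_false, pvSlice2, pvSlice4, pvSlice6]

-- the dict A builds for one length, rewritten as a fold over (prefix, ref) pairs of the kept rows
lemma dictL_eq (L : Nat) (code_field : String) (rows : List (List (String × String))) :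
    rows.foldl (pvStep L code_field) PySem.Dict.empty =
      ((pvBase L code_field rows).map (fun row => (pvPref L code_field row, pvRef row))).foldl
        (fun d p => d.modify p.1 [] (· ++ [p.2])) PySem.Dict.empty := by
  unfold pvStep pvBase
  rw [PySem.List.foldl_ite_eq_foldl_filter (p := fun row => L ≤ (pvRaw code_field row).length)]
  exact (List.foldl_map (f := fun row => (pvPref L code_field row, pvRef row))
    (g := fun (d : PySem.Dict String (List (List (String × String)))) (p : String × List (String × String)) =>
      d.modify p.1 [] (fun x => x ++ [p.2]))).symm

-- A's sorted emission of that dict is exactly pvBucket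
lemma bucketA_eq (L : Nat) (code_field : String) (rows : List (List (String × String))) :
    (PySem.List.sorted (rows.foldl (pvStep L code_field) PySem.Dict.empty).keys (fun k => k) false).map
        (fun p => (p, (rows.foldl (pvStep L code_field) PySem.Dict.empty).getD p [])) =
      pvBucket L code_field rows := by
  rw [dictL_eq]
  unfold pvBucket
  have hkeys :
      (((pvBase L code_field rows).map (fun row => (pvPref L code_field row, pvRef row))).foldl
        (fun d p => d.modify p.1 [] (· ++ [p.2])) PySem.Dict.empty).keys =
      PySem.Set.ofList ((pvBase L code_field rows).map (pvPref L code_field)) := by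
    simp only [PySem.Dict.keys_foldl_modify_key, PySem.Dict.keys_empty]
    show PySem.Set.ofList _ = _
    have h1 : (Prod.fst ∘ fun row => (pvPref L code_field row, pvRef row)) = pvPref L code_field := rfl
    rw [List.map_map, h1]
  rw [hkeys]
  apply List.map_congr_left
  intro p _
  simp only [PySem.Dict.getD_foldl_modify_append, PySem.Dict.getD_empty, List.nil_append,
    List.filter_map, List.map_map]
  rfl

lemma build_A_eq (rows : List (List (String × String))) (code_field : String) :
    build_prefix_index rows code_field =
      [("prefix2", pvBucket 2 code_field rows),
       ("prefix4", pvBucket 4 code_field rows),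
       ("prefix6", pvBucket 6 code_field rows)] := by
  unfold build_prefix_index
  have hstep : pvStepA code_field = fun b row =>
      (pvStep 2 code_field b.1 row, (fun (s : _ × _) row => (pvStep 4 code_field s.1 row, pvStep 6 code_field s.2 row)) b.2 row) := by
    funext b row; rw [stepA_eq]
  rw [hstep,
    PySem.List.foldl_prod_mk (f := pvStep 2 code_field)
      (g := fun s row => (pvStep 4 code_field s.1 row, pvStep 6 code_field s.2 row)),
    PySem.List.foldl_prod_mk (f := pvStep 4 code_field) (g := pvStep 6 code_field)]
  simp only [bucketA_eq]

-- B's record list is the (raw, ref) pairs of the rows with non-empty raw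
lemma records_eq (rows : List (List (String × String))) (code_field : String) :
    rows.foldl (pvStepB code_field) [] =
      (rows.filter (fun row => decide (pvRaw code_field row ≠ []))).map
        (fun row => (pvRaw code_field row, pvRef row)) := by
  have hstep : pvStepB code_field = fun acc row =>
      if pvRaw code_field row ≠ [] then acc ++ [(pvRaw code_field row, pvRef row)] else acc := by
    funext acc row
    unfold pvStepB pvRaw pvRef
    by_cases h : normalize_kuid_raw (pyOrOpt ((PySem.Dict.mk row).get? code_field) ((PySem.Dict.mk row).get? "KUID_raw")) = []
    · simp [h]
    · simp [h]
  rw [hstep, PySem.List.foldl_append_ite (p := fun row => pvRaw code_field row ≠ [])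
    (f := fun row => (pvRaw code_field row, pvRef row))]
  simp

-- the records B keeps for one length are exactly the kept rows' data
lemma keep_eq (L : Nat) (hL : 0 < L) (code_field : String) (rows : List (List (String × String))) :
    ((rows.foldl (pvStepB code_field) []).filter (fun r => decide (L ≤ r.1.length))) =
      (pvBase L code_field rows).map (fun row => (pvRaw code_field row, pvRef row)) := by
  rw [records_eq, List.filter_map, List.filter_filter]
  unfold pvBase
  congr 1
  apply List.filter_congr
  intro row _
  by_cases h : pvRaw code_field row = []
  · simp [h, Nat.not_le_of_lt hL]
  · simp [h]

lemma bucketB_eq (L : Nat) (hL : 0 < L) (code_field : String) (rows : List (List (String × String))) :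
    (PySem.List.sorted
        (PySem.List.dedup (((rows.foldl (pvStepB code_field) []).filter (fun r => decide (L ≤ r.1.length))).map
          (fun r => String.ofList (PySem.List.slice r.1 none (some (L : Int))))))
        (fun p => p) false).map
      (fun p =>
        (p, (((rows.foldl (pvStepB code_field) []).filter (fun r => decide (L ≤ r.1.length))).filter
              (fun r => String.ofList (PySem.List.slice r.1 none (some (L : Int))) == p)).map (fun r => r.2))) =
      pvBucket L code_field rows := by
  rw [keep_eq L hL]
  unfold pvBucket
  simp only [PySem.List.dedup_eq_ofList, List.map_map, List.filter_map, pvSlice_take]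
  have hmap : ((fun r : List Char × List (String × String) => String.ofList (r.1.take L)) ∘
      fun row => (pvRaw code_field row, pvRef row)) = pvPref L code_field := by
    funext row; simp [pvPref, Function.comp]
  rw [hmap]
  apply List.map_congr_left
  intro p _
  rfl

-- ===== VERDICT (by name: the statement is the Claim_ definition above) =====
theorem build_prefix_index_spec : Claim_equal_build_prefix_index := by
  intro rows code_field _
  unfold Spec_build_prefix_index
  rw [build_A_eq]
  show _ = build_prefix_index_alt rows code_field
  unfold build_prefix_index_alt
  simp only [bucketB_eq 2 (by norm_num) code_field rows,
    bucketB_eq 4 (by norm_num) code_field rows,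
    bucketB_eq 6 (by norm_num) code_field rows]
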